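-- pv_equiv track=rewrite | github.com/barricklab/ostir | ViennaRNA.py | convert_numbered_pairs_to_bracket
-- ===== SOURCE A (Python) =====
-- def convert_numbered_pairs_to_bracket(strands,bp_x,bp_y):
--
--     bp_x = [pos-1 for pos in bp_x[:]] #Shift so that 1st position is 0
--     bp_y = [pos-1 for pos in bp_y[:]] #Shift so that 1st position is 0
--
--     bracket_notation = []
--     counter=0
--     for (strand_number,seq_len) in enumerate(strands):
--         if strand_number > 0: bracket_notation.append("&")
--         for pos in range(counter,seq_len+counter):
--             if pos in bp_x:
--                 bracket_notation.append("(")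
--             elif pos in bp_y:
--                 bracket_notation.append(")")
--             else:
--                 bracket_notation.append(".")
--         counter+=seq_len
--
--     return "".join(bracket_notation)
-- ===== SOURCE B (Python) =====
-- def convert_numbered_pairs_to_bracket(strands, bp_x, bp_y):
--     # Alternative decomposition: preallocate one '.' cell per base, scatter ')' then '('
--     # into it ('(' written last so it wins ties, matching A's if/elif), then cut
--     # the array into consecutive per-strand slices joined with '&'.
--     total = sum(strands)
--     cells = ["."] * total
--     for y in bp_y:
--         if 0 <= y - 1 < total:
--             cells[y - 1] = ")"
--     for x in bp_x:
--         if 0 <= x - 1 < total: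
--             cells[x - 1] = "("
--     chunks = []
--     counter = 0
--     for seq_len in strands:
--         chunks.append("".join(cells[counter:counter + seq_len]))
--         counter += seq_len
--     return "&".join(chunks)
-- ===== Notes on version B (the rewrite author's own statement) =====
-- stated objective: alternative
-- what changed: B inverts the traversal: instead of testing every sequence position against bp_x/bp_y, it preallocates one '.' cell per base, scatters ')' then '(' writes from the bp lists into that array (range-guarded, '(' last so it wins ties like A's if/elif), and finally cuts the array into consecutive per-strand slices joined with '&'; Pre_ restricts strands to nonnegative lengths, the natural domain of sequence lengths.
-- outside the precondition, e.g. on convert_numbered_pairs_to_bracket([-1, 2], [1], [2]): A returns '&.(', B returns '&('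
import Mathlib
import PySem

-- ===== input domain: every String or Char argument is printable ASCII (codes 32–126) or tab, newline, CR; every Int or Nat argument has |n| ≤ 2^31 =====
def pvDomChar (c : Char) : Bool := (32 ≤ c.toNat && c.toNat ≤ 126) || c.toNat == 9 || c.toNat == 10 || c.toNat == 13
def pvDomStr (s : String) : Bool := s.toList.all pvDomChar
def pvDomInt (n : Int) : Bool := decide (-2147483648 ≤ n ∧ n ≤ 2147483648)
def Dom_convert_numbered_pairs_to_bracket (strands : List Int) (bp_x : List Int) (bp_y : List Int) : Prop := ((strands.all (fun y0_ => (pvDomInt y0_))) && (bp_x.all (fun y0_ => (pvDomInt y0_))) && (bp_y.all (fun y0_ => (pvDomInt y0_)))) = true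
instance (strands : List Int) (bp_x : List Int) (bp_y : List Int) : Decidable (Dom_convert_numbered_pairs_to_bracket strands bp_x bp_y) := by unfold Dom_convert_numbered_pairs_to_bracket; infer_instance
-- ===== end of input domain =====

-- B replaces A's per-position membership scans by a scatter pass: a preallocated '.'-cell array receives
-- ')' then '(' writes from the bp lists and is then cut into per-strand slices joined with '&' (objective: alternative).


-- ===== PORT A =====
def convert_numbered_pairs_to_bracket (strands : List Int) (bp_x : List Int) (bp_y : List Int) : String :=
  -- bp_x = [pos-1 for pos in bp_x[:]]; bp_y likewise
  let bpx := bp_x.map (fun pos => pos - 1)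
  let bpy := bp_y.map (fun pos => pos - 1)
  -- for (strand_number, seq_len) in enumerate(strands): … ; counter += seq_len
  let r := (PySem.List.enumerate strands 0).foldl
    (fun (st : List String × Int) p =>
      let bn := if 0 < p.1 then st.1 ++ ["&"] else st.1
      let bn := (PySem.List.pyRange st.2 (p.2 + st.2) 1).foldl
        (fun bn pos =>
          if bpx.contains pos then bn ++ ["("]
          else if bpy.contains pos then bn ++ [")"]
          else bn ++ ["."]) bn
      (bn, st.2 + p.2)) ([], 0)
  PySem.Str.join "" r.1

-- ===== PORT B =====
def convert_numbered_pairs_to_bracket_alt (strands : List Int) (bp_x : List Int) (bp_y : List Int) : String :=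
  -- total = sum(strands); cells = ["."] * total
  let total := strands.sum
  let cells0 : List String := PySem.List.pyRepeat ["."] total
  -- for y in bp_y: if 0 <= y-1 < total: cells[y-1] = ")"
  let cells1 := bp_y.foldl (fun a y => if 0 ≤ y - 1 ∧ y - 1 < total then PySem.List.pySetD a (y - 1) ")" else a) cells0
  -- for x in bp_x: if 0 <= x-1 < total: cells[x-1] = "("  ('(' written last, wins ties)
  let cells := bp_x.foldl (fun a x => if 0 ≤ x - 1 ∧ x - 1 < total then PySem.List.pySetD a (x - 1) "(" else a) cells1
  -- chunks: consecutive slices cells[counter:counter+seq_len]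
  let r := strands.foldl
    (fun (st : List String × Int) seq_len =>
      (st.1 ++ [PySem.Str.join "" (PySem.List.slice cells (some st.2) (some (st.2 + seq_len)))],
       st.2 + seq_len)) ([], 0)
  PySem.Str.join "&" r.1

-- ===== PRECONDITION & SPEC =====
-- Pre_ restricts strands to nonnegative entries, the natural domain of sequence lengths; A also returns on
-- negative lengths (its counter rewinds to negative positions), which B's position array does not represent.
def Pre_convert_numbered_pairs_to_bracket (strands : List Int) (bp_x : List Int) (bp_y : List Int) : Prop :=
  ∀ n ∈ strands, 0 ≤ n
instance (strands : List Int) (bp_x : List Int) (bp_y : List Int) : Decidable (Pre_convert_numbered_pairs_to_bracket strands bp_x bp_y) := by unfold Pre_convert_numbered_pairs_to_bracket; infer_instance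
def pvWitness_convert_numbered_pairs_to_bracket : List Int × List Int × List Int := ([2, 1], [1], [3])
def Spec_convert_numbered_pairs_to_bracket (strands : List Int) (bp_x : List Int) (bp_y : List Int) (out : String) : Prop := out = convert_numbered_pairs_to_bracket_alt strands bp_x bp_y
instance (strands : List Int) (bp_x : List Int) (bp_y : List Int) (out : String) : Decidable (Spec_convert_numbered_pairs_to_bracket strands bp_x bp_y out) := by unfold Spec_convert_numbered_pairs_to_bracket; infer_instance

-- ===== CLAIM (what is proved, stated in full; the proofs are below) =====
def Claim_equal_convert_numbered_pairs_to_bracket : Prop := ∀ (strands : List Int) (bp_x : List Int) (bp_y : List Int), Dom_convert_numbered_pairs_to_bracket strands bp_x bp_y → Pre_convert_numbered_pairs_to_bracket strands bp_x bp_y → Spec_convert_numbered_pairs_to_bracket strands bp_x bp_y (convert_numbered_pairs_to_bracket strands bp_x bp_y)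

-- ===== LEMMAS AND PROOFS =====

-- the character A picks at position pos (as a 1-character string)
def pvCharF (bpx bpy : List Int) (pos : Int) : String :=
  if bpx.contains pos then "(" else if bpy.contains pos then ")" else "."

-- B's chunk list, one string per strand, threading the counter
def pvChunks (f : Int → String) : List Int → Int → List String
  | [], _ => []
  | n :: r, c => PySem.Str.join "" ((PySem.List.pyRange c (n + c) 1).map f) :: pvChunks f r (c + n)

-- the pieces A appends for all strands after the first (each preceded by "&")
def pvTail (f : Int → String) : List Int → Int → List String
  | [], _ => []
  | n :: r, c => ("&" :: (PySem.List.pyRange c (n + c) 1).map f) ++ pvTail f r (c + n)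

-- one scatter pass writes v exactly at the shifted in-range positions of l
theorem pv_scatter (v : String) (total : Int) :
    ∀ (l : List Int) (arr : List String), arr.length = total.toNat →
      ∀ (i : Int), 0 ≤ i → i < total →
      ((l.foldl (fun a y => if 0 ≤ y - 1 ∧ y - 1 < total then PySem.List.pySetD a (y - 1) v else a) arr)[i.toNat]?.getD ".")
        = if i ∈ l.map (fun y => y - 1) then v else arr[i.toNat]?.getD "." := by
  intro l
  induction l with
  | nil => intro arr _ i _ _; simp
  | cons y ys ih =>
    intro arr hlen i hi0 hit
    rw [List.foldl_cons]
    by_cases hg : 0 ≤ y - 1 ∧ y - 1 < total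
    · rw [if_pos hg]
      have hlen' : (PySem.List.pySetD arr (y - 1) v).length = total.toNat := by
        rw [PySem.List.length_pySetD]; exact hlen
      rw [ih _ hlen' i hi0 hit]
      by_cases hmem : i ∈ ys.map (fun y => y - 1)
      · simp [hmem]
      · rw [if_neg hmem]
        rw [PySem.List.pySetD_of_nonneg _ _ hg.1]
        simp only [List.map_cons, List.mem_cons, hmem, or_false]
        rw [List.getElem?_set]
        by_cases he : i = y - 1
        · have : (y - 1).toNat = i.toNat := by omega
          have hlt : i.toNat < arr.length := by omega
          simp [he, this, hlt]
        · have h2 : y.toNat - 1 ≠ i.toNat := by omega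
          simp [he, h2]
    · rw [if_neg hg, ih _ hlen i hi0 hit]
      have he : i ≠ y - 1 := by omega
      simp [List.mem_cons, he]

-- length of the scatter pass
theorem pv_scatter_len (v : String) (total : Int) :
    ∀ (l : List Int) (arr : List String),
      (l.foldl (fun a y => if 0 ≤ y - 1 ∧ y - 1 < total then PySem.List.pySetD a (y - 1) v else a) arr).length
        = arr.length := by
  intro l
  induction l with
  | nil => intro arr; rfl
  | cons y ys ih =>
    intro arr
    rw [List.foldl_cons]
    by_cases hg : 0 ≤ y - 1 ∧ y - 1 < total
    · rw [if_pos hg, ih, PySem.List.length_pySetD]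
    · rw [if_neg hg, ih]

-- A's inner loop over one strand appends exactly the mapped characters
theorem pv_innerA (bpx bpy : List Int) :
    ∀ (l : List Int) (acc : List String),
      l.foldl (fun bn pos =>
          if bpx.contains pos then bn ++ ["("]
          else if bpy.contains pos then bn ++ [")"]
          else bn ++ ["."]) acc
        = acc ++ l.map (pvCharF bpx bpy) := by
  intro l
  induction l with
  | nil => intro acc; simp
  | cons x xs ih =>
    intro acc
    simp only [List.foldl_cons, List.map_cons, ih, pvCharF]
    split_ifs <;> simp

-- A's outer loop over the remaining strands (enumerate index ≥ 1: always prepends "&")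
theorem pv_outerA (bpx bpy : List Int) :
    ∀ (rest : List Int) (s : Int), 1 ≤ s → ∀ (bn : List String) (c : Int),
      ((PySem.List.enumerate rest s).foldl
        (fun (st : List String × Int) p =>
          ((if 0 < p.1 then st.1 ++ ["&"] else st.1)
             ++ (PySem.List.pyRange st.2 (p.2 + st.2) 1).map (pvCharF bpx bpy),
           st.2 + p.2)) (bn, c))
      = (bn ++ pvTail (pvCharF bpx bpy) rest c, c + rest.sum) := by
  intro rest
  induction rest with
  | nil => intro s hs bn c; simp [pvTail, PySem.List.enumerate_nil]
  | cons n r ih =>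
    intro s hs bn c
    rw [PySem.List.enumerate_cons, List.foldl_cons]
    have hpos : (0 : Int) < s := by omega
    simp only [hpos, if_pos]
    rw [ih (s + 1) (by omega)]
    simp only [Prod.mk.injEq, pvTail, List.sum_cons]
    exact ⟨by simp [List.append_assoc], by omega⟩

-- a clamped take/drop window of an array is the map of its entries over an index range
theorem pv_take_drop_map (arr : List String) (a b : Nat) (h : a + b ≤ arr.length) :
    (arr.drop a).take b = (List.range b).map (fun i => arr[a + i]?.getD ".") := by
  apply List.ext_getElem
  · simp; omega
  · intro i h1 h2
    have hi : i < b := by simp at h2; omega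
    have hlt : a + i < arr.length := by omega
    simp only [List.getElem_take, List.getElem_drop, List.getElem_map, List.getElem_range]
    rw [List.getElem?_eq_getElem hlt]
    rfl

-- B's outer loop produces exactly the chunk list of the cell array
theorem pv_outerB (cells : List String) (total : Int) (hc : cells.length = total.toNat) :
    ∀ (rest : List Int) (acc : List String) (c : Int), 0 ≤ c → c + rest.sum ≤ total →
      (∀ n ∈ rest, 0 ≤ n) →
      (rest.foldl
        (fun (st : List String × Int) seq_len =>
          (st.1 ++ [PySem.Str.join "" (PySem.List.slice cells (some st.2) (some (st.2 + seq_len)))],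
           st.2 + seq_len)) (acc, c))
      = (acc ++ pvChunks (fun pos => cells[pos.toNat]?.getD ".") rest c, c + rest.sum) := by
  intro rest
  induction rest with
  | nil => intro acc c _ _ _; simp [pvChunks]
  | cons n r ih =>
    intro acc c hc0 hsum hnn
    have hn0 : 0 ≤ n := hnn n (by simp)
    have hr0 : 0 ≤ r.sum := List.sum_nonneg (fun x hx => hnn x (by simp [hx]))
    have hcn : c + n ≤ total := by simp [List.sum_cons] at hsum; omega
    rw [List.foldl_cons, ih (acc ++ [_]) (c + n) (by omega)
      (by simp [List.sum_cons] at hsum ⊢; omega) (fun x hx => hnn x (by simp [hx]))]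
    have hs : PySem.List.slice cells (some c) (some (c + n))
        = (PySem.List.pyRange c (n + c) 1).map (fun pos => cells[pos.toNat]?.getD ".") := by
      rw [PySem.List.slice_toNat cells hc0 (by omega)]
      have h1 : (c + n).toNat - c.toNat = n.toNat := by omega
      rw [h1, pv_take_drop_map cells c.toNat n.toNat (by omega)]
      rw [PySem.List.pyRange_one]
      have h2 : (n + c - c).toNat = n.toNat := by omega
      rw [h2, List.map_map]
      apply List.map_congr_left
      intro k hk
      simp only [Function.comp]
      have : (c + (k : Int)).toNat = c.toNat + k := by omega
      rw [this]
    rw [hs]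
    simp only [Prod.mk.injEq, pvChunks, List.sum_cons]
    exact ⟨by simp [List.append_assoc], by omega⟩

-- chunk lists agree when the cell functions agree on [0, total)
theorem pv_chunks_congr (f g : Int → String) (total : Int)
    (hfg : ∀ pos, 0 ≤ pos → pos < total → f pos = g pos) :
    ∀ (rest : List Int) (c : Int), 0 ≤ c → c + rest.sum ≤ total → (∀ n ∈ rest, 0 ≤ n) →
      pvChunks f rest c = pvChunks g rest c := by
  intro rest
  induction rest with
  | nil => intro c _ _ _; rfl
  | cons n r ih =>
    intro c hc0 hsum hnn
    have hn0 : 0 ≤ n := hnn n (by simp)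
    have hr0 : 0 ≤ r.sum := List.sum_nonneg (fun x hx => hnn x (by simp [hx]))
    have hcn : c + n ≤ total := by simp [List.sum_cons] at hsum; omega
    simp only [pvChunks]
    congr 1
    · congr 1
      apply List.map_congr_left
      intro pos hpos
      rw [PySem.List.mem_pyRange_one] at hpos
      exact hfg pos (by omega) (by omega)
    · exact ih (c + n) (by omega) (by simp [List.sum_cons] at hsum ⊢; omega)
        (fun x hx => hnn x (by simp [hx]))

-- intercalate with empty separator is flatten
theorem pv_ic_nil : ∀ (l : List (List Char)), List.intercalate ([] : List Char) l = l.flatten := by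
  intro l
  induction l with
  | nil => simp [List.intercalate]
  | cons a t ih =>
    cases t with
    | nil => simp [List.intercalate]
    | cons b t' =>
      have := PySem.Chars.join_cons_cons ([] : List Char) a b t'
      simp only [PySem.Chars.join] at this
      simp [this, ih]

theorem pv_ic_amp (a b : List Char) (L : List (List Char)) :
    List.intercalate ['&'] ((a ++ '&' :: b) :: L) = a ++ '&' :: List.intercalate ['&'] (b :: L) := by
  cases L with
  | nil => simp [List.intercalate]
  | cons q t =>
    have h1 := PySem.Chars.join_cons_cons ['&'] (a ++ '&' :: b) q t
    have h2 := PySem.Chars.join_cons_cons ['&'] b q t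
    simp only [PySem.Chars.join] at h1 h2
    simp [h1, h2, List.append_assoc]

-- joining A's flat piece list with "" equals joining B's chunks with "&"
theorem pv_join_eq (f : Int → String) :
    ∀ (rest : List Int) (c : Int) (pre : List String),
      PySem.Str.join "" (pre ++ pvTail f rest c)
        = PySem.Str.join "&" (PySem.Str.join "" pre :: pvChunks f rest c) := by
  have h0 : "".toList = ([] : List Char) := by simp
  have hamp : "&".toList = ['&'] := by simp
  intro rest
  induction rest with
  | nil =>
    intro c pre
    simp only [pvTail, List.append_nil, pvChunks]
    simp [PySem.Str.join, PySem.Chars.join, List.intercalate, String.toList_ofList, h0, hamp]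
  | cons n r ih =>
    intro c pre
    have hL : pre ++ pvTail f (n :: r) c
        = (pre ++ "&" :: (PySem.List.pyRange c (n + c) 1).map f) ++ pvTail f r (c + n) := by
      simp [pvTail]
    rw [hL, ih (c + n) (pre ++ "&" :: (PySem.List.pyRange c (n + c) 1).map f)]
    simp only [pvChunks]
    simp only [PySem.Str.join, PySem.Chars.join]
    congr 1
    simp only [List.map_cons, String.toList_ofList, h0, hamp, pv_ic_nil,
      List.map_append, List.flatten_append, List.flatten_cons]
    rw [List.singleton_append, pv_ic_amp]
    cases hc : List.map String.toList (pvChunks f r (c + n)) with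
    | nil => simp [List.intercalate]
    | cons q t =>
      have h := PySem.Chars.join_cons_cons ['&'] ((List.map String.toList pre).flatten)
        ((List.map String.toList ((PySem.List.pyRange c (n + c) 1).map f)).flatten) (q :: t)
      simp only [PySem.Chars.join] at h
      rw [h]
      simp [List.append_assoc]

-- the fully scattered cell array reads back A's if/elif character on [0, total)
theorem pv_cells_char (bp_x bp_y : List Int) (total : Int) (pos : Int)
    (h0 : 0 ≤ pos) (ht : pos < total) :
    ((bp_x.foldl (fun a x => if 0 ≤ x - 1 ∧ x - 1 < total then PySem.List.pySetD a (x - 1) "(" else a)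
        (bp_y.foldl (fun a y => if 0 ≤ y - 1 ∧ y - 1 < total then PySem.List.pySetD a (y - 1) ")" else a)
          (PySem.List.pyRepeat ["."] total)))[pos.toNat]?.getD ".")
      = pvCharF (bp_x.map (fun p => p - 1)) (bp_y.map (fun p => p - 1)) pos := by
  have hrep : (PySem.List.pyRepeat (["."] : List String) total).length = total.toNat := by
    rw [PySem.List.pyRepeat_singleton, List.length_replicate]
  have hlen1 : (bp_y.foldl (fun a y => if 0 ≤ y - 1 ∧ y - 1 < total then PySem.List.pySetD a (y - 1) ")" else a)
      (PySem.List.pyRepeat ["."] total)).length = total.toNat := by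
    rw [pv_scatter_len, hrep]
  rw [pv_scatter "(" total bp_x _ hlen1 pos h0 ht,
      pv_scatter ")" total bp_y _ hrep pos h0 ht]
  have hdot : (PySem.List.pyRepeat (["."] : List String) total)[pos.toNat]?.getD "." = "." := by
    rw [PySem.List.pyRepeat_singleton]
    rcases lt_or_ge pos.toNat total.toNat with h | h
    · rw [List.getElem?_eq_getElem (by simpa using h)]; simp
    · rw [List.getElem?_eq_none (by simpa using h)]; rfl
  rw [hdot]
  unfold pvCharF
  simp only [List.contains_eq_mem, decide_eq_true_eq]

-- ===== VERDICT (by name: the statement is the Claim_ definition above) =====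
theorem convert_numbered_pairs_to_bracket_spec : Claim_equal_convert_numbered_pairs_to_bracket := by
  intro strands bp_x bp_y _ hpre
  unfold Spec_convert_numbered_pairs_to_bracket
  unfold convert_numbered_pairs_to_bracket convert_numbered_pairs_to_bracket_alt
  dsimp only
  have hlen : (bp_x.foldl (fun a x => if 0 ≤ x - 1 ∧ x - 1 < strands.sum then PySem.List.pySetD a (x - 1) "(" else a)
      (bp_y.foldl (fun a y => if 0 ≤ y - 1 ∧ y - 1 < strands.sum then PySem.List.pySetD a (y - 1) ")" else a)
        (PySem.List.pyRepeat ["."] strands.sum))).length = strands.sum.toNat := by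
    rw [pv_scatter_len, pv_scatter_len, PySem.List.pyRepeat_singleton, List.length_replicate]
  rw [pv_outerB _ strands.sum hlen strands [] 0 (by omega) (by omega) hpre]
  rw [pv_chunks_congr _ (pvCharF (bp_x.map (fun p => p - 1)) (bp_y.map (fun p => p - 1))) strands.sum
      (fun pos h0 ht => pv_cells_char bp_x bp_y strands.sum pos h0 ht)
      strands 0 (by omega) (by omega) hpre]
  cases strands with
  | nil =>
    simp [PySem.List.enumerate_nil, pvChunks, PySem.Str.join, PySem.Chars.join, List.intercalate]
  | cons n rest =>
    rw [PySem.List.enumerate_cons, List.foldl_cons]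
    simp only [pv_innerA]
    rw [pv_outerA _ _ rest (0 + 1) (by omega)]
    simp only [pvChunks, List.nil_append]
    rw [← pv_join_eq]
    simp
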